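-- pv_equiv track=rewrite | github.com/daniel-walters/aoc2021python | day3/solution.py | invert_binary
-- ===== SOURCE A (Python) =====
-- def invert_binary(bin: str) -> str:
--     inverted = ""
--
--     for ch in bin:
--         match ch:
--             case "1":
--                 inverted += "0"
--             case "0":
--                 inverted += "1"
--             case other:
--                 raise ValueError("Invalid binary num: " + other)
--
--     return inverted
-- ===== SOURCE B (Python) =====
-- def invert_binary(bin: str) -> str:
--     # Validate once (same first-offender error as A), then invert in one table-driven call.
--     for ch in bin:
--         if ch not in "01":
--             raise ValueError("Invalid binary num: " + ch)
--     return bin.translate(str.maketrans("10", "01"))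
-- ===== Notes on version B (the rewrite author's own statement) =====
-- stated objective: idiomatic
-- what changed: B replaces A's per-character match statement with string accumulation by a validation pass followed by a single str.translate call over a maketrans table.
import Mathlib
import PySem

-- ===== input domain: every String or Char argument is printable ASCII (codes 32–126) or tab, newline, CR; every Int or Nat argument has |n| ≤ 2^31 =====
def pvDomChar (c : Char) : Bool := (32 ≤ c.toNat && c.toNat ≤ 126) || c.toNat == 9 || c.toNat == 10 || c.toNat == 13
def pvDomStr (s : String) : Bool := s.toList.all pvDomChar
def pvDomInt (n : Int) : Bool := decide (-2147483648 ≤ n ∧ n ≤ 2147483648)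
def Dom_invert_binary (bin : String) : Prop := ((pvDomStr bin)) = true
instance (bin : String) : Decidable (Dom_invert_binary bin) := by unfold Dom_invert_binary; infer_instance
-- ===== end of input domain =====

-- B replaces A's per-character match/accumulate loop by a validation pass plus one
-- table-driven whole-string translation (idiomatic). Return-value equivalence only;
-- both raise ValueError on non-binary characters (excluded by Pre_).

-- ===== PORT A =====
-- A's loop: accumulate the inverted string character by character; on an invalid
-- character A raises ValueError (loop stops; such inputs are outside Pre_).
def invertGoA : List Char → List Char → List Char
  | [], inverted => inverted
  | ch :: rest, inverted =>
    if ch = '1' then invertGoA rest (inverted ++ ['0'])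
    else if ch = '0' then invertGoA rest (inverted ++ ['1'])
    else inverted  -- raise ValueError (unreachable under Pre_)

def invert_binary (bin : String) : String := String.ofList (invertGoA bin.toList [])

-- ===== PORT B =====
-- B's validation pass: all characters must be in "01" (else raise, outside Pre_).
def validBinB (bin : String) : Bool := bin.toList.all (fun ch => ch = '0' || ch = '1')

-- the maketrans("10","01") table
def trBit (ch : Char) : Char := if ch = '1' then '0' else if ch = '0' then '1' else ch

def invert_binary_alt (bin : String) : String :=
  if validBinB bin then String.ofList (bin.toList.map trBit)
  else ""  -- raise ValueError (unreachable under Pre_)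

-- ===== PRECONDITION & SPEC =====
-- Pre_ excludes inputs containing a character other than '0'/'1': both A and B raise
-- ValueError there (A returns no value).
def Pre_invert_binary (bin : String) : Prop := bin.toList.all (fun ch => ch = '0' || ch = '1') = true
instance (bin : String) : Decidable (Pre_invert_binary bin) := by unfold Pre_invert_binary; infer_instance
def pvWitness_invert_binary : String := "1001"

def Spec_invert_binary (bin : String) (out : String) : Prop := out = invert_binary_alt bin
instance (bin : String) (out : String) : Decidable (Spec_invert_binary bin out) := by unfold Spec_invert_binary; infer_instance

-- ===== CLAIM (what is proved, stated in full; the proofs are below) =====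
def Claim_equal_invert_binary : Prop := ∀ (bin : String), Dom_invert_binary bin → Pre_invert_binary bin → Spec_invert_binary bin (invert_binary bin)

-- ===== LEMMAS AND PROOFS =====
theorem invertGoA_spec (l : List Char) (acc : List Char)
    (h : ∀ ch ∈ l, ch = '0' ∨ ch = '1') :
    invertGoA l acc = acc ++ l.map trBit := by
  induction l generalizing acc with
  | nil => simp [invertGoA]
  | cons ch rest ih =>
    have hch := h ch (List.mem_cons_self ..)
    have hrest : ∀ c ∈ rest, c = '0' ∨ c = '1' := fun c hc => h c (List.mem_cons_of_mem _ hc)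
    rcases hch with h0 | h1 <;> subst_vars <;> simp [invertGoA, ih _ hrest, trBit]

-- ===== VERDICT (by name: the statement is the Claim_ definition above) =====
theorem invert_binary_spec : Claim_equal_invert_binary := by
  intro bin _ hpre
  unfold Spec_invert_binary invert_binary invert_binary_alt
  have hv : validBinB bin = true := hpre
  have hmem : ∀ ch ∈ bin.toList, ch = '0' ∨ ch = '1' := by
    unfold Pre_invert_binary at hpre
    simp only [List.all_eq_true, Bool.or_eq_true, decide_eq_true_eq] at hpre
    exact hpre
  rw [hv, if_pos rfl, invertGoA_spec bin.toList [] hmem]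
  simp
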